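-- pv_equiv track=rewrite | github.com/Gonza-e/Aed- | Prueba1.py | casiPerfectos
-- ===== SOURCE A (Python) =====
-- def casiPerfectos(n1,n2,s) -> bool:
--     if n1 == 1:
--         return True
--     else:
--         if n2 == 0:
--             if s == n1-1:
--                 return True
--             else:
--                 return False
--         else:
--             if n1 % n2 == 0:
--                 return casiPerfectos(n1,n2-1,s+n2)
--             else:
--                 return casiPerfectos(n1,n2-1,s)
-- ===== SOURCE B (Python) =====
-- def casiPerfectos(n1, n2, s) -> bool:
--     if n1 == 1:
--         return True
--     total = 0
--     i = 1
--     while i * i <= n1: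
--         if n1 % i == 0:
--             j = n1 // i
--             if i <= n2:
--                 total += i
--             if j != i and j <= n2:
--                 total += j
--         i += 1
--     return s + total == n1 - 1
-- ===== Notes on version B (the rewrite author's own statement) =====
-- stated objective: faster
-- what changed: A recursively scans every candidate 1..n2 testing n1 % d == 0; B sums the divisors of n1 that are <= n2 by iterating divisor pairs (i, n1//i) only up to sqrt(n1). Pre_ keeps the natural domain n1 >= 1 (excluding n1 <= 0, where A's value -- summing divisors of |n1| and comparing to n1-1 -- is accidental for an almost-perfect-number check) and excludes n2 < 0 with n1 != 1, where A recurses without end.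
-- outside the precondition, e.g. on casiPerfectos(-4, 2, -8): A returns True, B returns False; on casiPerfectos(0, 2, -1): A returns False, B returns True
import Mathlib
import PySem

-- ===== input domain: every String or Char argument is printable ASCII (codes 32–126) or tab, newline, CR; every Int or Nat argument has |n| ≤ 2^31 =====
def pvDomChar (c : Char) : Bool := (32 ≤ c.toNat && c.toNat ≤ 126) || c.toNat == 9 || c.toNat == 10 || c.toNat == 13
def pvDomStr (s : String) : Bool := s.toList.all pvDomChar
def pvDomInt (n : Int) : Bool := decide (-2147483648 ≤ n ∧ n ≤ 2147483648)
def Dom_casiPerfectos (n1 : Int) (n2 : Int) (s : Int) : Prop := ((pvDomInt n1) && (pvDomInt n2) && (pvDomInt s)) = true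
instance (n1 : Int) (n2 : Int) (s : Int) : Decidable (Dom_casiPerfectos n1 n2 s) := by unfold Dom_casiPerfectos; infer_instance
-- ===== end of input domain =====

-- B replaces A's O(n2) scan of 1..n2 with an O(√n1) divisor-pair loop (sum of divisors of n1 that are ≤ n2), on the natural domain n1 ≥ 1.


-- ===== PORT A =====
def casiPerfectos (n1 : Int) (n2 : Int) (s : Int) : Bool :=
  if n1 = 1 then true
  else if n2 = 0 then decide (s = n1 - 1)
  else if n2 < 0 then false  -- totality guard only: Python's recursion never terminates here (outside Pre_)
  else if PySem.Int.mod n1 n2 = 0 then casiPerfectos n1 (n2 - 1) (s + n2)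
  else casiPerfectos n1 (n2 - 1) s
termination_by n2.toNat
decreasing_by all_goals omega

-- ===== PORT B =====
-- the `while i*i <= n1` loop of Source B
def altLoop (m : Int) (n2 : Int) (i : Int) (total : Int) : Int :=
  if i * i ≤ m then
    altLoop m n2 (i + 1)
      (if PySem.Int.mod m i = 0 then
        (let j := PySem.Int.floordiv m i
         let t1 := if i ≤ n2 then total + i else total
         if j ≠ i ∧ j ≤ n2 then t1 + j else t1)
       else total)
  else total
termination_by (m + 1 - i).toNat
decreasing_by
  have hi : i ≤ m := by
    by_cases h0 : i ≤ 0
    · nlinarith [mul_self_nonneg i]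
    · nlinarith
  omega

def casiPerfectos_alt (n1 : Int) (n2 : Int) (s : Int) : Bool :=
  if n1 = 1 then true
  else decide (s + altLoop n1 n2 1 0 = n1 - 1)

-- ===== PRECONDITION & SPEC =====
-- Pre_ keeps the natural domain n1 ≥ 1 of an almost-perfect-number check (for n1 ≤ 0 A's value — summing divisors
-- of |n1| and comparing to n1-1 — is accidental) and excludes n2 < 0 with n1 ≠ 1, where Python A recurses without end.
def Pre_casiPerfectos (n1 : Int) (n2 : Int) (_s : Int) : Prop := 1 ≤ n1 ∧ (n1 = 1 ∨ 0 ≤ n2)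
instance (n1 : Int) (n2 : Int) (s : Int) : Decidable (Pre_casiPerfectos n1 n2 s) := by unfold Pre_casiPerfectos; infer_instance
def pvWitness_casiPerfectos : Int × Int × Int := (6, 3, 0)

def Spec_casiPerfectos (n1 : Int) (n2 : Int) (s : Int) (out : Bool) : Prop := out = casiPerfectos_alt n1 n2 s
instance (n1 : Int) (n2 : Int) (s : Int) (out : Bool) : Decidable (Spec_casiPerfectos n1 n2 s out) := by unfold Spec_casiPerfectos; infer_instance

-- ===== CLAIM (what is proved, stated in full; the proofs are below) =====
def Claim_equal_casiPerfectos : Prop := ∀ (n1 : Int) (n2 : Int) (s : Int), Dom_casiPerfectos n1 n2 s → Pre_casiPerfectos n1 n2 s → Spec_casiPerfectos n1 n2 s (casiPerfectos n1 n2 s)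

-- ===== LEMMAS AND PROOFS =====

-- A's running sum: sum of d ∈ [1,K] dividing n1
def divSum (n1 : Int) (K : Nat) : Int := ∑ d ∈ Finset.Icc 1 K, if (d : Int) ∣ n1 then (d : Int) else 0

-- the set B's loop still has to process at step i (divisors of M whose small cofactor is ≥ i)
def pending (M : Nat) (n2 : Int) (i : Int) : Finset Nat :=
  M.divisors.filter (fun d => (d : Int) ≤ n2 ∧ i ≤ ((min d (M / d) : Nat) : Int))

lemma casiPerfectos_char (n1 : Int) (h1 : n1 ≠ 1) :
    ∀ (k : Nat) (s : Int), casiPerfectos n1 (k : Int) s = decide (s + divSum n1 k = n1 - 1) := by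
  intro k
  induction k with
  | zero =>
    intro s
    rw [casiPerfectos]
    simp [h1, divSum]
  | succ k ih =>
    intro s
    rw [casiPerfectos]
    have hne : ((k + 1 : Nat) : Int) ≠ 0 := by push_cast; omega
    have hnlt : ¬ ((k + 1 : Nat) : Int) < 0 := by push_cast; omega
    rw [if_neg h1, if_neg hne, if_neg hnlt]
    have hcast : ((k + 1 : Nat) : Int) - 1 = (k : Int) := by push_cast; ring
    have hsum : divSum n1 (k + 1)
        = divSum n1 k + (if ((k + 1 : Nat) : Int) ∣ n1 then ((k + 1 : Nat) : Int) else 0) := by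
      unfold divSum
      rw [Finset.sum_Icc_succ_top (by omega)]
    by_cases hd : ((k + 1 : Nat) : Int) ∣ n1
    · rw [if_pos (by rw [PySem.Int.mod_eq_zero_iff_dvd]; exact hd)]
      rw [hcast, ih, hsum, if_pos hd]
      exact decide_eq_decide.mpr (by constructor <;> intro h <;> linarith)
    · rw [if_neg (by rw [PySem.Int.mod_eq_zero_iff_dvd]; exact hd)]
      rw [hcast, ih, hsum, if_neg hd, add_zero]

lemma pending_eq_empty (M : Nat) (n2 : Int) (i : Int) (h1 : 1 ≤ i) (h : (M : Int) < i * i) :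
    pending M n2 i = ∅ := by
  ext d
  simp only [pending, Finset.mem_filter, Finset.notMem_empty, iff_false]
  rintro ⟨hd, hle, hiu⟩
  have hdvd : d ∣ M := (Nat.mem_divisors.mp hd).1
  have hM : M ≠ 0 := (Nat.mem_divisors.mp hd).2
  have hdpos : 0 < d := Nat.pos_of_mem_divisors hd
  have hqpos : 0 < M / d := Nat.div_pos (Nat.le_of_dvd (by omega) hdvd) hdpos
  have hmul : M / d * d = M := Nat.div_mul_cancel hdvd
  set u := min d (M / d) with hu
  have hu1 : u * u ≤ M := by
    calc u * u ≤ (M / d) * d := Nat.mul_le_mul (min_le_right _ _) (min_le_left _ _)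
    _ = M := hmul
  have : i * i ≤ (u : Int) * (u : Int) := mul_le_mul hiu hiu (by omega) (by omega)
  have : i * i ≤ (M : Int) := le_trans this (by exact_mod_cast hu1)
  omega

lemma pending_step (M : Nat) (n2 : Int) (i : Int) (h1 : 1 ≤ i) (h2 : i * i ≤ (M : Int)) :
    ∑ d ∈ pending M n2 i, (d : Int) =
      ∑ d ∈ pending M n2 (i + 1), (d : Int) +
      (if i.toNat ∣ M then
         (if i ≤ n2 then i else 0) +
         (if (M / i.toNat : Nat) ≠ i.toNat ∧ ((M / i.toNat : Nat) : Int) ≤ n2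
            then ((M / i.toNat : Nat) : Int) else 0)
       else 0) := by
  set I := i.toNat with hI
  have hiI : i = (I : Int) := by omega
  have hI1 : 1 ≤ I := by omega
  have hII : I * I ≤ M := by
    have h2' : ((I : Int)) * (I : Int) ≤ (M : Int) := by rw [← hiI]; exact h2
    exact_mod_cast h2'
  have hM : 0 < M := by
    have := Nat.mul_le_mul hI1 hI1
    omega
  -- split pending i into pending (i+1) and the min = I layer
  have hsplit : pending M n2 i
      = pending M n2 (i + 1) ∪ M.divisors.filter (fun d : Nat => (d : Int) ≤ n2 ∧ min d (M / d) = I) := by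
    ext d
    simp only [pending, Finset.mem_union, Finset.mem_filter]
    constructor
    · rintro ⟨hd, hle, hmin⟩
      by_cases hmi : min d (M / d) = I
      · exact Or.inr ⟨hd, hle, hmi⟩
      · exact Or.inl ⟨hd, hle, by omega⟩
    · rintro (⟨hd, hle, hmin⟩ | ⟨hd, hle, hmin⟩)
      · exact ⟨hd, hle, by omega⟩
      · exact ⟨hd, hle, by omega⟩
  have hdisj : Disjoint (pending M n2 (i + 1))
      (M.divisors.filter (fun d : Nat => (d : Int) ≤ n2 ∧ min d (M / d) = I)) := by
    rw [Finset.disjoint_left]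
    intro d hd1 hd2
    simp only [pending, Finset.mem_filter] at hd1 hd2
    omega
  rw [hsplit, Finset.sum_union hdisj]
  congr 1
  by_cases hdvd : I ∣ M
  · set J := M / I with hJdef
    have hJdvd : J ∣ M := Nat.div_dvd_of_dvd hdvd
    have hJ1 : 1 ≤ J := Nat.div_pos (Nat.le_of_dvd hM hdvd) (by omega)
    have hIJ : I * J = M := Nat.mul_div_cancel' hdvd
    have hIleJ : I ≤ J := Nat.le_of_mul_le_mul_left (by omega) (by omega : 0 < I)
    have hMJ : M / J = I := by rw [← hIJ, Nat.mul_div_cancel _ (by omega : 0 < J)]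
    have hE : M.divisors.filter (fun d : Nat => (d : Int) ≤ n2 ∧ min d (M / d) = I)
        = ({I, J} : Finset Nat).filter (fun d : Nat => (d : Int) ≤ n2) := by
      ext d
      simp only [Finset.mem_filter, Nat.mem_divisors, Finset.mem_insert, Finset.mem_singleton]
      constructor
      · rintro ⟨⟨hdM, hM0⟩, hle, hmin⟩
        refine ⟨?_, hle⟩
        rcases min_cases d (M / d) with ⟨hmeq, _⟩ | ⟨hmeq, _⟩
        · exact Or.inl (by omega)
        · right
          have hdI : M / d = I := by omega
          have hdmul : d * (M / d) = M := Nat.mul_div_cancel' hdM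
          rw [hdI] at hdmul
          have : I * d = I * J := by rw [hIJ, ← hdmul, Nat.mul_comm]
          exact Nat.eq_of_mul_eq_mul_left (by omega) this
      · rintro ⟨hd, hle⟩
        rcases hd with rfl | rfl
        · exact ⟨⟨hdvd, by omega⟩, hle, by rw [← hJdef]; omega⟩
        · exact ⟨⟨hJdvd, by omega⟩, hle, by rw [hMJ]; omega⟩
    rw [hE, if_pos hdvd]
    by_cases hJI : J = I
    · have hpair : ({I, J} : Finset Nat) = {I} := by rw [hJI]; simp
      rw [hpair, Finset.filter_singleton]
      have hsnd : (if J ≠ I ∧ (J : Int) ≤ n2 then (J : Int) else 0) = 0 := by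
        rw [if_neg]; rintro ⟨h, _⟩; exact h hJI
      rw [hsnd, add_zero]
      by_cases hc : (I : Int) ≤ n2
      · rw [if_pos hc, Finset.sum_singleton, if_pos (by omega)]
        omega
      · rw [if_neg hc, Finset.sum_empty, if_neg (by omega)]
    · rw [Finset.sum_filter, Finset.sum_insert (by simp [Ne.symm hJI] : I ∉ ({J} : Finset Nat)),
          Finset.sum_singleton]
      congr 1
      · by_cases hc : (I : Int) ≤ n2
        · rw [if_pos hc, if_pos (by omega)]; omega
        · rw [if_neg hc, if_neg (by omega)]
      · by_cases hc : (J : Int) ≤ n2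
        · rw [if_pos hc, if_pos ⟨hJI, hc⟩]
        · rw [if_neg hc, if_neg (by rintro ⟨_, h⟩; exact hc h)]
  · have hE : M.divisors.filter (fun d : Nat => (d : Int) ≤ n2 ∧ min d (M / d) = I) = ∅ := by
      ext d
      simp only [Finset.mem_filter, Nat.mem_divisors, Finset.notMem_empty, iff_false]
      rintro ⟨⟨hdM, hM0⟩, _, hmin⟩
      rcases min_cases d (M / d) with ⟨hmeq, _⟩ | ⟨hmeq, _⟩
      · exact hdvd ((by omega : d = I) ▸ hdM)
      · have hdI : M / d = I := by omega
        exact hdvd (hdI ▸ Nat.div_dvd_of_dvd hdM)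
    rw [hE, Finset.sum_empty, if_neg hdvd]

lemma altLoop_inv (m n2 : Int) (hm : 0 < m) :
    ∀ (fuel : Nat) (i t : Int), 1 ≤ i → (m + 1 - i).toNat ≤ fuel →
      altLoop m n2 i t = t + ∑ d ∈ pending m.toNat n2 i, (d : Int) := by
  have hmM : ((m.toNat : Nat) : Int) = m := by omega
  intro fuel
  induction fuel with
  | zero =>
    intro i t h1 hf
    have hgt : m + 1 ≤ i := by omega
    have hlt : ¬ i * i ≤ m := by nlinarith
    rw [altLoop, if_neg hlt, pending_eq_empty _ _ _ h1 (by rw [hmM]; nlinarith), Finset.sum_empty,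
        add_zero]
  | succ fuel ih =>
    intro i t h1 hf
    rw [altLoop]
    by_cases hle : i * i ≤ m
    · rw [if_pos hle]
      have him : i ≤ m := by nlinarith
      rw [ih (i + 1) _ (by omega) (by omega)]
      have hstep := pending_step m.toNat n2 i h1 (by rw [hmM]; exact hle)
      have e1 : ((i.toNat : Nat) : Int) = i := by omega
      have hmod : (PySem.Int.mod m i = 0) ↔ (i.toNat ∣ m.toNat) := by
        rw [PySem.Int.mod_eq_zero_iff_dvd]
        constructor
        · intro h
          exact Int.natCast_dvd_natCast.mp (by rwa [e1, hmM])
        · intro h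
          have h2 := Int.natCast_dvd_natCast.mpr h
          rwa [e1, hmM] at h2
      rw [hstep]
      by_cases hdvd : i.toNat ∣ m.toNat
      · rw [if_pos (hmod.mpr hdvd), if_pos hdvd]
        have hfd : PySem.Int.floordiv m i = ((m.toNat / i.toNat : Nat) : Int) := by
          rw [PySem.Int.floordiv_eq_ediv_of_pos (by omega), Int.natCast_ediv, e1, hmM]
        simp only [hfd]
        have hiI : i = ((i.toNat : Nat) : Int) := by omega
        split_ifs with hA hB hB <;> omega
      · rw [if_neg (fun h => hdvd (hmod.mp h)), if_neg hdvd]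
        ring
    · rw [if_neg hle,
          pending_eq_empty _ _ _ h1 (by rw [hmM]; exact not_le.mp hle), Finset.sum_empty,
          add_zero]

lemma divSum_eq_altLoop (n1 n2 : Int) (hn1 : 0 < n1) (hn2 : 0 ≤ n2) :
    divSum n1 n2.toNat = altLoop n1 n2 1 0 := by
  have habs : ((n1.toNat : Nat) : Int) = n1 := Int.toNat_of_nonneg (by omega)
  rw [altLoop_inv n1 n2 hn1 (n1 + 1).toNat 1 0 (by omega) (by omega), zero_add]
  have hpend : pending n1.toNat n2 1
      = n1.toNat.divisors.filter (fun d : Nat => (d : Int) ≤ n2) := by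
    ext d
    simp only [pending, Finset.mem_filter, and_congr_right_iff]
    intro hd
    have hdpos : 0 < d := Nat.pos_of_mem_divisors hd
    have hdvd : d ∣ n1.toNat := (Nat.mem_divisors.mp hd).1
    have hq : 0 < n1.toNat / d :=
      Nat.div_pos (Nat.le_of_dvd (by omega) hdvd) hdpos
    constructor
    · rintro ⟨h, _⟩; exact h
    · intro h; exact ⟨h, by omega⟩
  rw [hpend]
  unfold divSum
  rw [← Finset.sum_filter]
  apply Finset.sum_congr _ (fun _ _ => rfl)
  ext d
  simp only [Finset.mem_filter, Finset.mem_Icc, Nat.mem_divisors]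
  have hbridge : (d : Int) ∣ n1 ↔ d ∣ n1.toNat := by
    constructor
    · intro h
      exact Int.natCast_dvd_natCast.mp (by rw [habs]; exact h)
    · intro h
      have h2 := Int.natCast_dvd_natCast.mpr h
      rwa [habs] at h2
  constructor
  · rintro ⟨⟨hd1, hd2⟩, hdvd⟩
    exact ⟨⟨hbridge.mp hdvd, by omega⟩, by omega⟩
  · rintro ⟨⟨hdvd, hM0⟩, hle⟩
    have hdpos : 0 < d := Nat.pos_of_dvd_of_pos hdvd (by omega)
    exact ⟨⟨by omega, by omega⟩, hbridge.mpr hdvd⟩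

-- ===== VERDICT (by name: the statement is the Claim_ definition above) =====
theorem casiPerfectos_spec : Claim_equal_casiPerfectos := by
  intro n1 n2 s _ hpre
  unfold Spec_casiPerfectos casiPerfectos_alt
  by_cases h1 : n1 = 1
  · rw [casiPerfectos]; simp [h1]
  · have hn2 : 0 ≤ n2 := hpre.2.resolve_left h1
    have hn1 : 0 < n1 := by rcases hpre with ⟨h, _⟩; omega
    have hk : n2 = ((n2.toNat : Nat) : Int) := by omega
    rw [hk, casiPerfectos_char n1 h1 n2.toNat s]
    rw [if_neg h1, ← hk, divSum_eq_altLoop n1 n2 hn1 hn2]
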